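-- pv_equiv track=rewrite | github.com/pmesgari/aoc2022 | day_16/day16.py | generate_all_paths
-- ===== SOURCE A (Python) =====
-- def generate_all_paths(shortest_paths, rates, time_limit):
--     current_path = []
--     all_paths = []
--     previous = 'AA'
--
--     nonzero_rates = []
--     for v, rate in rates.items():
--         if rate != 0:
--             nonzero_rates.append(v)
--
--     opened = {}
--     for v in nonzero_rates:
--         opened[v] = False
--
--     def dfs(previous, current, time):
--         time = time - shortest_paths[previous][current] - 1
--         current_path.append((current, time))
--         opened[current] = True
--         for nxt in nonzero_rates:
--             # ensure we are never exploring current again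
--             # ensure we are never exploring an already open valve
--             if nxt != current and not opened[nxt]:
--                 # if we already know going to the next valve means we are out of time
--                 # then skip, it is not worth it to get there
--                 if time - shortest_paths[current][nxt] - 1 < 2:
--                     continue
--                 dfs(previous=current, current=nxt, time=time)
--         all_paths.append([item for item in current_path])
--         current_path.pop(-1)
--         opened[current] = False
--
--     for v in nonzero_rates:
--         dfs(previous, v, time_limit)
--     return all_paths
-- ===== SOURCE B (Python) =====
-- def generate_all_paths(shortest_paths, rates, time_limit):
--     # Pure recursive enumeration: no shared mutable state, no backtracking undo.
--     nonzero = [v for v, r in rates.items() if r != 0]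
--
--     def walk(current, time, prefix, visited):
--         out = []
--         for nxt in nonzero:
--             if nxt == current or nxt in visited:
--                 continue
--             t2 = time - shortest_paths[current][nxt] - 1
--             if t2 < 2:
--                 continue
--             out += walk(nxt, t2, prefix + [(nxt, t2)], visited | {current})
--         out.append(prefix)
--         return out
--
--     result = []
--     for v in nonzero:
--         t = time_limit - shortest_paths['AA'][v] - 1
--         result += walk(v, t, [(v, t)], frozenset())
--     return result
-- ===== Notes on version B (the rewrite author's own statement) =====
-- stated objective: simpler
-- what changed: A's effectful DFS that mutates shared state (current_path/all_paths/opened dicts) and undoes each change on backtrack is replaced by a pure recursive enumeration that passes the path prefix and visited set down and returns the list of paths directly.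
import Mathlib
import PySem

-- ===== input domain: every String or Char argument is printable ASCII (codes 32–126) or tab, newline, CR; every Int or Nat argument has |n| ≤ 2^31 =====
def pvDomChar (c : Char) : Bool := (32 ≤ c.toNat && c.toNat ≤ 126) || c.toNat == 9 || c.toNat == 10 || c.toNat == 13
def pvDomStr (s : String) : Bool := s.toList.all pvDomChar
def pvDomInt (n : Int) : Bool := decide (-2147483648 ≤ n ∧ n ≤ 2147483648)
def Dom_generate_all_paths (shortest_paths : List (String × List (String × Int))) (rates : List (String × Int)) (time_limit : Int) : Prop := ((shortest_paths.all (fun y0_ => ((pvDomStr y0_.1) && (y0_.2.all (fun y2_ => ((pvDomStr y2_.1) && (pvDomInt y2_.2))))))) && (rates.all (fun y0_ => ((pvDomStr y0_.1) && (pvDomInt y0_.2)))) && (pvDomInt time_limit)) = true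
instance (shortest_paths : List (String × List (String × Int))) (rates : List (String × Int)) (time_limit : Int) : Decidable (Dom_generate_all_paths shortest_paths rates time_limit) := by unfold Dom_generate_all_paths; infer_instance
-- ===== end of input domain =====

-- B replaces A's effectful DFS on shared mutable state (current_path / all_paths / opened, with
-- backtracking undo) by a pure recursive enumeration that returns the list of paths; same values.

-- shared input decoding: the dict-of-dicts / dict parameters as PySem.Dict (Python dict semantics)
def pvSpDict (shortest_paths : List (String × List (String × Int))) :
    PySem.Dict String (PySem.Dict String Int) :=
  PySem.Dict.ofList (shortest_paths.map (fun p => (p.1, PySem.Dict.ofList p.2)))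

-- ===== PORT A =====
-- state = (current_path, all_paths, opened); fuel bounds the recursion depth (it never runs out:
-- each call opens one more valve, so depth ≤ number of nonzero valves = the fuel supplied below).
def pvDfsA (sp : PySem.Dict String (PySem.Dict String Int)) (nz : List String)
    (fuel : Nat) (previous current : String) (time : Int)
    (st : List (String × Int) × List (List (String × Int)) × PySem.Dict String Bool) :
    List (String × Int) × List (List (String × Int)) × PySem.Dict String Bool :=
  match fuel with
  | 0 => st
  | fuel + 1 =>
    let t := time - (sp.getD previous PySem.Dict.empty).getD current 0 - 1
    -- current_path.append((current, time)); opened[current] = True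
    let st1 := (st.1 ++ [(current, t)], st.2.1, st.2.2.insert current true)
    let st2 := nz.foldl (fun s nxt =>
        if nxt ≠ current ∧ s.2.2.getD nxt false = false then
          if t - (sp.getD current PySem.Dict.empty).getD nxt 0 - 1 < 2 then s
          else pvDfsA sp nz fuel current nxt t s
        else s) st1
    -- all_paths.append(copy); current_path.pop(-1) (list is nonempty: dropLast is exact); opened[current] = False
    (st2.1.dropLast, st2.2.1 ++ [st2.1], st2.2.2.insert current false)

def generate_all_paths (shortest_paths : List (String × List (String × Int))) (rates : List (String × Int)) (time_limit : Int) : List (List (String × Int)) :=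
  let sp := pvSpDict shortest_paths
  let nz := (PySem.Dict.ofList rates).items.foldl
      (fun l p => if p.2 ≠ 0 then l ++ [p.1] else l) []
  let opened := nz.foldl (fun d v => d.insert v false) PySem.Dict.empty
  let st := nz.foldl (fun s v => pvDfsA sp nz nz.length "AA" v time_limit s) ([], [], opened)
  st.2.1

-- ===== PORT B =====
-- pure recursion: returns the sub-enumeration; fuel as in A (depth ≤ |nonzero valves|)
def pvWalkB (sp : PySem.Dict String (PySem.Dict String Int)) (nz : List String)
    (fuel : Nat) (current : String) (time : Int)
    (pfx : List (String × Int)) (visited : PySem.Set String) : List (List (String × Int)) :=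
  match fuel with
  | 0 => []
  | fuel + 1 =>
    (nz.foldl (fun out nxt =>
        if nxt = current ∨ PySem.Set.contains visited nxt then out
        else
          let t2 := time - (sp.getD current PySem.Dict.empty).getD nxt 0 - 1
          if t2 < 2 then out
          else out ++ pvWalkB sp nz fuel nxt t2 (pfx ++ [(nxt, t2)]) (PySem.Set.add visited current)) [])
      ++ [pfx]

def generate_all_paths_alt (shortest_paths : List (String × List (String × Int))) (rates : List (String × Int)) (time_limit : Int) : List (List (String × Int)) :=
  let sp := pvSpDict shortest_paths
  let nz := ((PySem.Dict.ofList rates).items.filter (fun p => p.2 ≠ 0)).map (·.1)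
  nz.foldl (fun res v =>
      let t := time_limit - (sp.getD "AA" PySem.Dict.empty).getD v 0 - 1
      res ++ pvWalkB sp nz nz.length v t [(v, t)] PySem.Set.empty) []

-- ===== PRECONDITION & SPEC =====
-- Pre_ excludes exactly the inputs where the Python raises KeyError: A (and B) unconditionally
-- looks up shortest_paths['AA'][v] for every nonzero-rate valve v and shortest_paths[u][v] for
-- every ordered pair of distinct nonzero-rate valves, so all of those entries must exist.
def Pre_generate_all_paths (shortest_paths : List (String × List (String × Int))) (rates : List (String × Int)) (time_limit : Int) : Prop :=
  let sp := pvSpDict shortest_paths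
  let nz := ((PySem.Dict.ofList rates).items.filter (fun p => p.2 ≠ 0)).map (·.1)
  (∀ v ∈ nz, (sp.getD "AA" PySem.Dict.empty).contains v = true) ∧
  (∀ u ∈ nz, ∀ v ∈ nz, v ≠ u → (sp.getD u PySem.Dict.empty).contains v = true)
instance (shortest_paths : List (String × List (String × Int))) (rates : List (String × Int)) (time_limit : Int) : Decidable (Pre_generate_all_paths shortest_paths rates time_limit) := by unfold Pre_generate_all_paths; infer_instance

def pvWitness_generate_all_paths : (List (String × List (String × Int))) × (List (String × Int)) × Int :=
  ([("AA", [("BB", 1), ("CC", 2)]), ("BB", [("CC", 1)]), ("CC", [("BB", 2)])],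
   [("BB", 13), ("CC", 2)], 30)

def Spec_generate_all_paths (shortest_paths : List (String × List (String × Int))) (rates : List (String × Int)) (time_limit : Int) (out : List (List (String × Int))) : Prop := out = generate_all_paths_alt shortest_paths rates time_limit
instance (shortest_paths : List (String × List (String × Int))) (rates : List (String × Int)) (time_limit : Int) (out : List (List (String × Int))) : Decidable (Spec_generate_all_paths shortest_paths rates time_limit out) := by unfold Spec_generate_all_paths; infer_instance

-- ===== CLAIM (what is proved, stated in full; the proofs are below) =====
def Claim_equal_generate_all_paths : Prop := ∀ (shortest_paths : List (String × List (String × Int))) (rates : List (String × Int)) (time_limit : Int), Dom_generate_all_paths shortest_paths rates time_limit → Pre_generate_all_paths shortest_paths rates time_limit → Spec_generate_all_paths shortest_paths rates time_limit (generate_all_paths shortest_paths rates time_limit)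

-- ===== LEMMAS AND PROOFS =====

def pvInv (nz : List String) (opened : PySem.Dict String Bool) (visited : List String) : Prop :=
  opened.keys.Nodup ∧
  ∀ v ∈ nz, opened.contains v = true ∧ opened.getD v false = decide (v ∈ visited)

def pvH (sp : PySem.Dict String (PySem.Dict String Int)) (nz : List String) (fuel : Nat)
    (current : String) (t : Int) (pfx : List (String × Int)) (visited : PySem.Set String)
    (nxt : String) : List (List (String × Int)) :=
  if nxt = current ∨ PySem.Set.contains visited nxt then []
  else
    let t2 := t - (sp.getD current PySem.Dict.empty).getD nxt 0 - 1
    if t2 < 2 then []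
    else pvWalkB sp nz fuel nxt t2 (pfx ++ [(nxt, t2)]) (PySem.Set.add visited current)

lemma pvInsert_eq_self {ν : Type} (d : PySem.Dict String ν) (k : String) (v : ν)
    (hnd : d.keys.Nodup) (h : d.get? k = some v) : d.insert k v = d := by
  have hc : d.contains k = true := by rw [PySem.Dict.contains_eq_isSome_get?, h]; rfl
  apply PySem.Dict.ext
  rw [PySem.Dict.items_insert_of_contains d v hc]
  have hid : ∀ p ∈ d.items, (if (p.1 == k) = true then (k, v) else p) = p := by
    intro p hp
    by_cases hpk : (p.1 == k) = true
    · have hp1 : p.1 = k := by simpa using hpk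
      have h2 := PySem.Dict.get?_of_mem_items d (k := p.1) (v := p.2)
        (by simpa using hp) hnd
      rw [hp1, h] at h2
      simp only [hpk, if_true]
      obtain ⟨a, b⟩ := p
      simp only at hp1 h2 ⊢
      injection h2 with h3
      simp [hp1, h3]
    · simp [hpk]
  rw [List.map_congr_left hid]
  simp

lemma pvWalkB_succ (sp : PySem.Dict String (PySem.Dict String Int)) (nz : List String)
    (fuel : Nat) (current : String) (t : Int) (pfx : List (String × Int))
    (visited : PySem.Set String) :
    pvWalkB sp nz (fuel + 1) current t pfx visited =
      nz.flatMap (pvH sp nz fuel current t pfx visited) ++ [pfx] := by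
  simp only [pvWalkB]
  rw [PySem.List.foldl_congr_mem nz _
      (fun out nxt => out ++ pvH sp nz fuel current t pfx visited nxt) []
      (by
        intro acc x hx
        simp only [pvH]
        split_ifs <;> simp),
    PySem.List.foldl_append_eq_flatMap]
  simp

lemma pvDfs_eq_walk (sp : PySem.Dict String (PySem.Dict String Int)) (nz : List String) :
    ∀ (fuel : Nat) (visited : List String) (current : String),
      current ∈ nz → current ∉ visited →
      ∀ (previous : String) (time : Int) (path : List (String × Int))
        (acc : List (List (String × Int))) (opened : PySem.Dict String Bool),
        pvInv nz opened visited →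
        pvDfsA sp nz fuel previous current time (path, acc, opened) =
          (path,
           acc ++ pvWalkB sp nz fuel current
             (time - (sp.getD previous PySem.Dict.empty).getD current 0 - 1)
             (path ++ [(current, time - (sp.getD previous PySem.Dict.empty).getD current 0 - 1)])
             visited,
           opened) := by
  intro fuel
  induction fuel with
  | zero =>
    intro visited current hc hcv previous time path acc opened hinv
    simp [pvDfsA, pvWalkB]
  | succ fuel ih =>
    intro visited current hc hcv previous time path acc opened hinv
    obtain ⟨hknd, hvals⟩ := hinv
    rw [pvWalkB_succ]
    simp only [pvDfsA]
    set t := time - (sp.getD previous PySem.Dict.empty).getD current 0 - 1 with ht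
    have hgD : ∀ v ∈ nz,
        (opened.insert current true).getD v false = decide (v ∈ visited ++ [current]) := by
      intro v hv
      rw [PySem.Dict.getD_insert]
      by_cases hvc : v = current
      · simp [hvc]
      · simp only [hvc, if_false]
        rw [(hvals v hv).2]
        simp [List.mem_append, hvc]
    have hinv' : pvInv nz (opened.insert current true) (visited ++ [current]) := by
      refine ⟨PySem.Dict.nodup_keys_insert _ _ _ hknd, fun v hv => ⟨?_, hgD v hv⟩⟩
      rw [PySem.Dict.contains_insert]
      simp [(hvals v hv).1]
    have key : ∀ (l : List String), (∀ x ∈ l, x ∈ nz) →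
        ∀ (acc₂ : List (List (String × Int))),
        l.foldl (fun s nxt =>
            if nxt ≠ current ∧ s.2.2.getD nxt false = false then
              if t - (sp.getD current PySem.Dict.empty).getD nxt 0 - 1 < 2 then s
              else pvDfsA sp nz fuel current nxt t s
            else s) (path ++ [(current, t)], acc₂, opened.insert current true)
          = (path ++ [(current, t)],
             acc₂ ++ l.flatMap (pvH sp nz fuel current t (path ++ [(current, t)]) visited),
             opened.insert current true) := by
      intro l
      induction l with
      | nil => intro _ acc₂; simp
      | cons x l ihl =>
        intro hsub acc₂
        have hxnz : x ∈ nz := hsub x (by simp)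
        have hsub' : ∀ y ∈ l, y ∈ nz := fun y hy => hsub y (by simp [hy])
        simp only [List.foldl_cons, List.flatMap_cons]
        by_cases hskip : x = current ∨ x ∈ visited
        · have hcond : ¬(x ≠ current ∧ (opened.insert current true).getD x false = false) := by
            rintro ⟨h1, h2⟩
            rw [hgD x hxnz] at h2
            rcases hskip with h | h
            · exact h1 h
            · simp [List.mem_append, h] at h2
          have hH : pvH sp nz fuel current t (path ++ [(current, t)]) visited x = [] := by
            simp only [pvH]
            rw [if_pos]
            rcases hskip with h | h
            · exact Or.inl h
            · exact Or.inr (by simpa [PySem.Set.contains_iff] using h)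
          rw [if_neg hcond, hH]
          simpa using ihl hsub' acc₂
        · rw [not_or] at hskip
          have hcond : x ≠ current ∧ (opened.insert current true).getD x false = false := by
            refine ⟨hskip.1, ?_⟩
            rw [hgD x hxnz]
            simp [List.mem_append, hskip.1, hskip.2]
          rw [if_pos hcond]
          have hHtest : ¬(x = current ∨ PySem.Set.contains visited x = true) := by
            rintro (h | h)
            · exact hskip.1 h
            · exact hskip.2 (by simpa [PySem.Set.contains_iff] using h)
          by_cases hp : t - (sp.getD current PySem.Dict.empty).getD x 0 - 1 < 2
          · have hH : pvH sp nz fuel current t (path ++ [(current, t)]) visited x = [] := by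
              simp only [pvH]
              rw [if_neg hHtest]
              rw [if_pos hp]
            rw [if_pos hp, hH]
            simpa using ihl hsub' acc₂
          · rw [if_neg hp]
            have hrec := ih (visited ++ [current]) x hxnz
              (by simp [List.mem_append, hskip.1, hskip.2])
              current t (path ++ [(current, t)]) acc₂ (opened.insert current true) hinv'
            rw [hrec]
            have hH : pvH sp nz fuel current t (path ++ [(current, t)]) visited x =
                pvWalkB sp nz fuel x (t - (sp.getD current PySem.Dict.empty).getD x 0 - 1)
                  ((path ++ [(current, t)]) ++ [(x, t - (sp.getD current PySem.Dict.empty).getD x 0 - 1)])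
                  (visited ++ [current]) := by
              simp only [pvH]
              rw [if_neg hHtest]
              rw [if_neg hp, PySem.Set.add_of_not_mem hcv]
            rw [hH, ihl hsub' _]
            simp
    rw [key nz (fun x hx => hx) acc]
    have hget : opened.get? current = some false := by
      have h1 := (hvals current hc).1
      have h2 := (hvals current hc).2
      rw [PySem.Dict.contains_eq_isSome_get?] at h1
      cases hopt : opened.get? current with
      | none => rw [hopt] at h1; simp at h1
      | some b =>
        rw [PySem.Dict.getD_eq_get?_getD, hopt] at h2
        simp [hcv] at h2
        rw [h2]
    rw [PySem.Dict.insert_insert_self, pvInsert_eq_self opened current false hknd hget]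
    simp

lemma pvNzFold (l : List (String × Int)) (acc : List String) :
    l.foldl (fun acc p => if p.2 ≠ 0 then acc ++ [p.1] else acc) acc
      = acc ++ (l.filter (fun p => p.2 ≠ 0)).map (·.1) := by
  induction l generalizing acc with
  | nil => simp
  | cons p l ih =>
    simp only [List.foldl_cons, List.filter_cons]
    by_cases hp : p.2 ≠ 0
    · rw [if_pos hp, ih]
      simp [hp]
    · rw [if_neg hp, ih]
      simp [hp]

lemma pvGetDFoldFalse (l : List String) (d : PySem.Dict String Bool) (v : String)
    (h : d.getD v false = false) :
    (l.foldl (fun d x => d.insert x false) d).getD v false = false := by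
  induction l generalizing d with
  | nil => simpa
  | cons x l ih =>
    simp only [List.foldl_cons]
    apply ih
    rw [PySem.Dict.getD_insert]
    split
    · rfl
    · exact h

lemma pvInv0 (nz : List String) :
    pvInv nz (nz.foldl (fun d v => d.insert v false) PySem.Dict.empty) [] := by
  constructor
  · exact PySem.Dict.nodup_keys_foldl_insert nz (fun _ _ => false) _ PySem.Dict.nodup_keys_empty
  · intro v hv
    constructor
    · rw [PySem.Dict.contains_iff_mem_keys, PySem.Dict.keys_foldl_insert]
      rw [PySem.Set.mem_update]
      exact Or.inr hv
    · rw [pvGetDFoldFalse]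
      · simp
      · simp [PySem.Dict.getD_empty]

-- ===== VERDICT (by name: the statement is the Claim_ definition above) =====
theorem generate_all_paths_spec : Claim_equal_generate_all_paths := by
  intro sps rates tl _hdom _hpre
  unfold Spec_generate_all_paths
  unfold generate_all_paths generate_all_paths_alt
  rw [pvNzFold]
  simp only [List.nil_append]
  set sp := pvSpDict sps with hsp
  set nz := (((PySem.Dict.ofList rates).items.filter (fun p => p.2 ≠ 0)).map (·.1)) with hnzdef
  set opened0 := nz.foldl (fun d v => d.insert v false) PySem.Dict.empty with hop
  have outer : ∀ (l : List String), (∀ x ∈ l, x ∈ nz) →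
      ∀ (acc : List (List (String × Int))),
      l.foldl (fun s v => pvDfsA sp nz nz.length "AA" v tl s) ([], acc, opened0)
        = ([], acc ++ l.flatMap (fun v => pvWalkB sp nz nz.length v
            (tl - (sp.getD "AA" PySem.Dict.empty).getD v 0 - 1)
            [(v, tl - (sp.getD "AA" PySem.Dict.empty).getD v 0 - 1)] []), opened0) := by
    intro l
    induction l with
    | nil => intro _ acc; simp
    | cons v l ihl =>
      intro hsub acc
      simp only [List.foldl_cons, List.flatMap_cons]
      rw [pvDfs_eq_walk sp nz nz.length [] v (hsub v (by simp)) (by simp) "AA" tl [] acc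
        opened0 (pvInv0 nz)]
      simp only [List.nil_append]
      rw [ihl (fun y hy => hsub y (by simp [hy]))]
      simp
  rw [outer nz (fun x hx => hx) []]
  rw [PySem.List.foldl_congr_mem nz _
      (fun res v => res ++ pvWalkB sp nz nz.length v
        (tl - (sp.getD "AA" PySem.Dict.empty).getD v 0 - 1)
        [(v, tl - (sp.getD "AA" PySem.Dict.empty).getD v 0 - 1)] PySem.Set.empty) []
      (by intro acc x hx; rfl),
    PySem.List.foldl_append_eq_flatMap]
  simp
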